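-- pv_equiv track=rewrite | github.com/GioZulber/modelado-y-simulacion | backend/main.py | _extract_inline_calculus_command
-- ===== SOURCE A (Python) =====
-- def _extract_inline_calculus_command(operation: str, expression: str) -> tuple[str, str]:
--     text = expression.strip()
--     lower_text = text.lower()
--     commands = {
--         "derivar": "derivar",
--         "derivada": "derivar",
--         "integrar": "integrar",
--         "integral": "integrar",
--         "edo": "edo",
--         "ode": "edo",
--         "ecuacion diferencial": "edo",
--     }
--
--     for command, normalized_operation in commands.items():
--         prefix = f"{command} "
--         if lower_text.startswith(prefix):
--             return normalized_operation, text[len(prefix):].strip()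
--
--     return operation, text
-- ===== SOURCE B (Python) =====
-- _SINGLE_WORD = {
--     "derivar": "derivar",
--     "derivada": "derivar",
--     "integrar": "integrar",
--     "integral": "integrar",
--     "edo": "edo",
--     "ode": "edo",
-- }
--
--
-- def _extract_inline_calculus_command(operation: str, expression: str) -> tuple[str, str]:
--     text = expression.strip()
--     lower_text = text.lower()
--     if lower_text.startswith("ecuacion diferencial "):
--         return "edo", text[21:].strip()
--     i = lower_text.find(" ")
--     if i != -1:
--         normalized = _SINGLE_WORD.get(lower_text[:i])
--         if normalized is not None:
--             return normalized, text[i + 1:].strip()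
--     return operation, text
-- ===== Notes on version B (the rewrite author's own statement) =====
-- stated objective: alternative
-- what changed: Replaces A's linear scan over all seven command prefixes with a single guard for the lone two-word command followed by first-token extraction (find the first space) and one dictionary lookup of that token.
import Mathlib
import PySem

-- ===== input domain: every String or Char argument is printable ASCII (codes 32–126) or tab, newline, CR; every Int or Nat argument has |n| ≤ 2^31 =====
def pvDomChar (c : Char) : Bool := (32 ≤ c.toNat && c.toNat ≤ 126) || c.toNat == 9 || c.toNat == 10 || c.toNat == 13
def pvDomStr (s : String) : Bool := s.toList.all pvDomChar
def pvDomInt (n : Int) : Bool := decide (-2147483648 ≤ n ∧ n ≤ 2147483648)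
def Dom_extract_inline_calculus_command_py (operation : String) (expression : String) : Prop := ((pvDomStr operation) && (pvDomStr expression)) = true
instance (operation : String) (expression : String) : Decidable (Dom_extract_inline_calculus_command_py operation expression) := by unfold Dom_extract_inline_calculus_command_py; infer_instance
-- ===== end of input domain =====

-- B replaces A's scan over all seven command prefixes by one guard for the sole
-- two-word command plus a first-token extraction and a dictionary lookup (objective: alternative).

-- ===== PORT A =====
def pvCommandsA : List (String × String) :=
  [("derivar", "derivar"), ("derivada", "derivar"), ("integrar", "integrar"),
   ("integral", "integrar"), ("edo", "edo"), ("ode", "edo"), ("ecuacion diferencial", "edo")]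

def pvLoopA (operation text lower_text : String) : List (String × String) → String × String
  | [] => (operation, text)
  | (command, normalized) :: rest =>
    let pre := command ++ " "
    if PySem.Str.startswith lower_text pre then
      (normalized, PySem.Str.strip (PySem.Str.slice text (some (PySem.Str.len pre)) none))
    else pvLoopA operation text lower_text rest

def extract_inline_calculus_command_py (operation : String) (expression : String) : String × String :=
  let text := PySem.Str.strip expression
  let lower_text := PySem.Str.lower text
  pvLoopA operation text lower_text pvCommandsA

-- ===== PORT B =====
def pvSingleWord : PySem.Dict String String :=
  PySem.Dict.mk
    [("derivar", "derivar"), ("derivada", "derivar"), ("integrar", "integrar"),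
     ("integral", "integrar"), ("edo", "edo"), ("ode", "edo")]

def extract_inline_calculus_command_py_alt (operation : String) (expression : String) : String × String :=
  let text := PySem.Str.strip expression
  let lower_text := PySem.Str.lower text
  if PySem.Str.startswith lower_text "ecuacion diferencial " then
    ("edo", PySem.Str.strip (PySem.Str.slice text (some 21) none))
  else
    let i := PySem.Str.find lower_text " "
    if i ≠ -1 then
      match PySem.Dict.get? pvSingleWord (PySem.Str.slice lower_text none (some i)) with
      | some normalized => (normalized, PySem.Str.strip (PySem.Str.slice text (some (i + 1)) none))
      | none => (operation, text)
    else (operation, text)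

-- ===== PRECONDITION & SPEC =====
def Spec_extract_inline_calculus_command_py (operation : String) (expression : String) (out : String × String) : Prop := out = extract_inline_calculus_command_py_alt operation expression
instance (operation : String) (expression : String) (out : String × String) : Decidable (Spec_extract_inline_calculus_command_py operation expression out) := by unfold Spec_extract_inline_calculus_command_py; infer_instance

-- ===== CLAIM (what is proved, stated in full; the proofs are below) =====
def Claim_equal_extract_inline_calculus_command_py : Prop := ∀ (operation : String) (expression : String), Dom_extract_inline_calculus_command_py operation expression → Spec_extract_inline_calculus_command_py operation expression (extract_inline_calculus_command_py operation expression)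

-- ===== LEMMAS AND PROOFS =====

-- a singleton is an infix iff its element occurs
lemma pvSingleton_infix {c : Char} {l : List Char} (h : c ∈ l) : [c] <:+: l := by
  obtain ⟨s, t, rfl⟩ := List.append_of_mem h
  exact ⟨s, t, by simp⟩

-- two prefixes of the same list are comparable; used to refute simultaneous matches
lemma pvNotPrefix {p q l : List Char} (hq : q <+: l) (h1 : ¬ p <+: q) (h2 : ¬ q <+: p) :
    ¬ p <+: l := fun hp => (List.prefix_or_prefix_of_prefix hp hq).elim h1 h2

-- characterisation: for a space-free word w, "w followed by a space" is a prefix of l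
-- iff l's first space is at position n = |w| and l starts with w
lemma pvSW {l w : List Char} {n : ℕ} {t : List Char} (hw : ' ' ∉ w)
    (hd : l.drop n = ' ' :: t) (hmin : ∀ i < n, ¬ [' '] <+: l.drop i) :
    ((w ++ [' ']) <+: l) ↔ l.take n = w := by
  constructor
  · rintro ⟨r, hr⟩
    have hr' : w ++ (' ' :: r) = l := by simpa using hr
    have hdropw : l.drop w.length = ' ' :: r := by
      rw [← hr']; exact List.drop_left
    have hnw : ¬ w.length < n := fun hlt =>
      hmin w.length hlt ⟨r, by rw [hdropw]; rfl⟩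
    have hwn : ¬ n < w.length := by
      intro hlt
      have hnlen : n < l.length := by
        have := congrArg List.length hd
        simp at this; omega
      have hwpre : w <+: l := ⟨' ' :: r, hr'⟩
      have hln : l[n] = ' ' := by
        have hlt0 : 0 < (l.drop n).length := by simp [hd]
        have h := List.getElem_drop (xs := l) (i := n) (j := 0) (h := hlt0)
        simp only [hd, List.getElem_cons_zero] at h
        simpa using h.symm
      have hwe := hwpre.getElem (i := n) hlt
      have hsp : w[n]'hlt = ' ' := hwe.trans hln
      exact hw (hsp ▸ List.getElem_mem hlt)
    have heq : w.length = n := by omega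
    rw [← hr', ← heq, List.take_left]
  · intro hk
    refine ⟨t, ?_⟩
    have hsplit : l = l.take n ++ l.drop n := (List.take_append_drop n l).symm
    rw [hsplit, hk, hd]; simp

-- B's body on already-stripped/lowered strings (proof-side copy of the body of the alt port)
def pvBBody (operation text lower_text : String) : String × String :=
  if PySem.Str.startswith lower_text "ecuacion diferencial " then
    ("edo", PySem.Str.strip (PySem.Str.slice text (some 21) none))
  else
    let i := PySem.Str.find lower_text " "
    if i ≠ -1 then
      match PySem.Dict.get? pvSingleWord (PySem.Str.slice lower_text none (some i)) with
      | some normalized => (normalized, PySem.Str.strip (PySem.Str.slice text (some (i + 1)) none))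
      | none => (operation, text)
    else (operation, text)

lemma pvAlt_eq (operation expression : String) :
    extract_inline_calculus_command_py_alt operation expression =
    pvBBody operation (PySem.Str.strip expression) (PySem.Str.lower (PySem.Str.strip expression)) := rfl

lemma pvGetNil (k : String) :
    (PySem.Dict.mk ([] : List (String × String))).get? k = none := rfl

-- the heart: A's seven-prefix scan equals B's body, for ANY pair (text, lower_text)
lemma pvMain (op text lt : String) :
    pvLoopA op text lt pvCommandsA = pvBBody op text lt := by
  have hfind_eq : PySem.Str.find lt " " = PySem.Chars.find lt.toList [' '] := by
    rw [PySem.Str.find_eq]; rfl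
  by_cases hec : ("ecuacion diferencial ".toList <+: lt.toList)
  · -- the two-word command matches: the six one-word prefixes cannot also match
    have hecB : PySem.Str.startswith lt "ecuacion diferencial " = true := by
      rw [PySem.Str.startswith_eq, PySem.Chars.startswith_iff]; exact hec
    have hno : ∀ p : String, ¬ (p.toList <+: "ecuacion diferencial ".toList) →
        ¬ ("ecuacion diferencial ".toList <+: p.toList) →
        PySem.Str.startswith lt p = false := by
      intro p h1 h2
      rw [PySem.Str.startswith_eq]
      exact Bool.eq_false_iff.mpr fun hh =>
        pvNotPrefix hec h1 h2 ((PySem.Chars.startswith_iff _ _).mp hh)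
    have b1 : PySem.Str.startswith lt ("derivar" ++ " ") = false := hno _ (by decide) (by decide)
    have b2 : PySem.Str.startswith lt ("derivada" ++ " ") = false := hno _ (by decide) (by decide)
    have b3 : PySem.Str.startswith lt ("integrar" ++ " ") = false := hno _ (by decide) (by decide)
    have b4 : PySem.Str.startswith lt ("integral" ++ " ") = false := hno _ (by decide) (by decide)
    have b5 : PySem.Str.startswith lt ("edo" ++ " ") = false := hno _ (by decide) (by decide)
    have b6 : PySem.Str.startswith lt ("ode" ++ " ") = false := hno _ (by decide) (by decide)
    have b7 : PySem.Str.startswith lt ("ecuacion diferencial" ++ " ") = true := hecB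
    have hl7 : PySem.Str.len ("ecuacion diferencial" ++ " ") = 21 := by decide
    simp only [pvLoopA, pvCommandsA, pvBBody, b1, b2, b3, b4, b5, b6, b7, hecB, hl7,
      Bool.false_eq_true, if_false, if_true]
  · have hecB : PySem.Str.startswith lt "ecuacion diferencial " = false := by
      rw [PySem.Str.startswith_eq]
      exact Bool.eq_false_iff.mpr fun hh => hec ((PySem.Chars.startswith_iff _ _).mp hh)
    have b7 : PySem.Str.startswith lt ("ecuacion diferencial" ++ " ") = false := hecB
    by_cases hf : PySem.Chars.find lt.toList [' '] = -1
    · -- no space at all: no prefix ending in a space can match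
      have hnos : ' ' ∉ lt.toList := fun hm =>
        ((PySem.Chars.find_eq_neg_one_iff _ _).mp hf) (pvSingleton_infix hm)
      have hno : ∀ p : String, ' ' ∈ p.toList → PySem.Str.startswith lt p = false := by
        intro p hp
        rw [PySem.Str.startswith_eq]
        exact Bool.eq_false_iff.mpr fun hh =>
          hnos (((PySem.Chars.startswith_iff _ _).mp hh).subset hp)
      have b1 : PySem.Str.startswith lt ("derivar" ++ " ") = false := hno _ (by decide)
      have b2 : PySem.Str.startswith lt ("derivada" ++ " ") = false := hno _ (by decide)
      have b3 : PySem.Str.startswith lt ("integrar" ++ " ") = false := hno _ (by decide)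
      have b4 : PySem.Str.startswith lt ("integral" ++ " ") = false := hno _ (by decide)
      have b5 : PySem.Str.startswith lt ("edo" ++ " ") = false := hno _ (by decide)
      have b6 : PySem.Str.startswith lt ("ode" ++ " ") = false := hno _ (by decide)
      have hfi : (PySem.Str.find lt " " ≠ -1) = False := by
        simp [hfind_eq]; exact hf
      simp only [pvLoopA, pvCommandsA, pvBBody, b1, b2, b3, b4, b5, b6, b7, hecB, hfi,
        Bool.false_eq_true, if_false, ne_eq, not_true_eq_false]
    · -- a first space exists at position n
      have h0 : 0 ≤ PySem.Chars.find lt.toList [' '] := by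
        have := PySem.Chars.neg_one_le_find lt.toList [' ']; omega
      obtain ⟨hp, hmin⟩ := PySem.Chars.find_spec h0
      set n := (PySem.Chars.find lt.toList [' ']).toNat with hn
      obtain ⟨t, ht⟩ := hp
      have hd : lt.toList.drop n = ' ' :: t := by rw [← ht]; rfl
      have hnlen : n < lt.length := by
        have := congrArg List.length hd; simp at this; omega
      have hfn : PySem.Chars.find lt.toList [' '] = (n : Int) := (Int.toNat_of_nonneg h0).symm
      have hkey : (PySem.Str.slice lt none (some (PySem.Str.find lt " "))).toList =
          lt.toList.take n := by
        rw [PySem.Str.toList_slice, hfind_eq, hfn]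
        have : PySem.Chars.slice lt.toList none (some (n : Int)) =
            PySem.List.slice lt.toList none (some (n : Int)) := rfl
        rw [this, PySem.List.slice_to _ (by exact_mod_cast Nat.zero_le n)]
        simp
      have hiff : ∀ w : String, ' ' ∉ w.toList →
          (PySem.Str.startswith lt (w ++ " ") = true ↔ lt.toList.take n = w.toList) := by
        intro w hw
        rw [PySem.Str.startswith_eq, PySem.Chars.startswith_iff]
        have hto : (w ++ " ").toList = w.toList ++ [' '] := by
          rw [String.toList_append]; rfl
        rw [hto]
        exact pvSW hw hd hmin
      have hfi : (PySem.Str.find lt " " ≠ -1) = True := by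
        simp [hfind_eq]; exact hf
      -- dispatch on which single word (if any) the first token is
      have keyEq : ∀ w : String, lt.toList.take n = w.toList →
          PySem.Str.slice lt none (some (PySem.Str.find lt " ")) = w := by
        intro w hw
        exact String.toList_inj.mp (by rw [hkey, hw])
      have keyNe : ∀ w : String, ¬ lt.toList.take n = w.toList →
          (w == PySem.Str.slice lt none (some (PySem.Str.find lt " "))) = false := by
        intro w hw
        refine beq_eq_false_iff_ne.mpr fun hh => hw ?_
        rw [← hh] at hkey; exact hkey.symm
      have lenEq : ∀ w : String, lt.toList.take n = w.toList → n = w.length := by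
        intro w hw
        have := congrArg List.length hw
        simp at this
        omega
      have hidx : ∀ w : String, lt.toList.take n = w.toList →
          PySem.Str.find lt " " + 1 = ((w.length : Int) + 1) := by
        intro w hw; rw [hfind_eq, hfn, lenEq w hw]
      by_cases c1 : lt.toList.take n = "derivar".toList
      · have s1 : PySem.Str.startswith lt ("derivar" ++ " ") = true := (hiff _ (by decide)).mpr c1
        have hk := keyEq _ c1
        have hlen : PySem.Str.len ("derivar" ++ " ") = 8 := by decide
        have hi : PySem.Str.find lt " " + 1 = (8 : Int) := by
          rw [hidx _ c1]; decide
        simp only [pvLoopA, pvCommandsA, pvBBody, s1, hecB, b7, hfi, hk, hlen, hi,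
          pvSingleWord, PySem.Dict.get?_mk_cons, beq_self_eq_true, if_true, ne_eq,
          not_false_eq_true, Bool.false_eq_true, if_true, if_false]
      · have s1 : PySem.Str.startswith lt ("derivar" ++ " ") = false :=
          Bool.eq_false_iff.mpr fun hh => c1 ((hiff _ (by decide)).mp hh)
        have k1 := keyNe "derivar" c1
        by_cases c2 : lt.toList.take n = "derivada".toList
        · have s2 : PySem.Str.startswith lt ("derivada" ++ " ") = true := (hiff _ (by decide)).mpr c2
          have hk := keyEq _ c2
          have hlen : PySem.Str.len ("derivada" ++ " ") = 9 := by decide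
          have hi : PySem.Str.find lt " " + 1 = (9 : Int) := by
            rw [hidx _ c2]; decide
          have kq : ("derivar" == ("derivada" : String)) = false := by decide
          simp only [pvLoopA, pvCommandsA, pvBBody, s1, s2, hecB, b7, hfi, hk, hlen, hi, kq,
            pvSingleWord, PySem.Dict.get?_mk_cons, beq_self_eq_true, if_true, if_false,
            Bool.false_eq_true, ne_eq, not_false_eq_true, Bool.false_eq_true, if_true, if_false]
        · have s2 : PySem.Str.startswith lt ("derivada" ++ " ") = false :=
            Bool.eq_false_iff.mpr fun hh => c2 ((hiff _ (by decide)).mp hh)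
          have k2 := keyNe "derivada" c2
          by_cases c3 : lt.toList.take n = "integrar".toList
          · have s3 : PySem.Str.startswith lt ("integrar" ++ " ") = true := (hiff _ (by decide)).mpr c3
            have hk := keyEq _ c3
            have hlen : PySem.Str.len ("integrar" ++ " ") = 9 := by decide
            have hi : PySem.Str.find lt " " + 1 = (9 : Int) := by
              rw [hidx _ c3]; decide
            have kq1 : ("derivar" == ("integrar" : String)) = false := by decide
            have kq2 : ("derivada" == ("integrar" : String)) = false := by decide
            simp only [pvLoopA, pvCommandsA, pvBBody, s1, s2, s3, hecB, b7, hfi, hk, hlen, hi,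
              kq1, kq2, pvSingleWord, PySem.Dict.get?_mk_cons, beq_self_eq_true, if_true,
              if_false, Bool.false_eq_true, ne_eq, not_false_eq_true, Bool.false_eq_true, if_true, if_false]
          · have s3 : PySem.Str.startswith lt ("integrar" ++ " ") = false :=
              Bool.eq_false_iff.mpr fun hh => c3 ((hiff _ (by decide)).mp hh)
            have k3 := keyNe "integrar" c3
            by_cases c4 : lt.toList.take n = "integral".toList
            · have s4 : PySem.Str.startswith lt ("integral" ++ " ") = true := (hiff _ (by decide)).mpr c4
              have hk := keyEq _ c4
              have hlen : PySem.Str.len ("integral" ++ " ") = 9 := by decide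
              have hi : PySem.Str.find lt " " + 1 = (9 : Int) := by
                rw [hidx _ c4]; decide
              have kq1 : ("derivar" == ("integral" : String)) = false := by decide
              have kq2 : ("derivada" == ("integral" : String)) = false := by decide
              have kq3 : ("integrar" == ("integral" : String)) = false := by decide
              simp only [pvLoopA, pvCommandsA, pvBBody, s1, s2, s3, s4, hecB, b7, hfi, hk, hlen,
                hi, kq1, kq2, kq3, pvSingleWord, PySem.Dict.get?_mk_cons, beq_self_eq_true,
                if_true, if_false, Bool.false_eq_true, ne_eq, not_false_eq_true, Bool.false_eq_true, if_true, if_false]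
            · have s4 : PySem.Str.startswith lt ("integral" ++ " ") = false :=
                Bool.eq_false_iff.mpr fun hh => c4 ((hiff _ (by decide)).mp hh)
              have k4 := keyNe "integral" c4
              by_cases c5 : lt.toList.take n = "edo".toList
              · have s5 : PySem.Str.startswith lt ("edo" ++ " ") = true := (hiff _ (by decide)).mpr c5
                have hk := keyEq _ c5
                have hlen : PySem.Str.len ("edo" ++ " ") = 4 := by decide
                have hi : PySem.Str.find lt " " + 1 = (4 : Int) := by
                  rw [hidx _ c5]; decide
                have kq1 : ("derivar" == ("edo" : String)) = false := by decide
                have kq2 : ("derivada" == ("edo" : String)) = false := by decide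
                have kq3 : ("integrar" == ("edo" : String)) = false := by decide
                have kq4 : ("integral" == ("edo" : String)) = false := by decide
                simp only [pvLoopA, pvCommandsA, pvBBody, s1, s2, s3, s4, s5, hecB, b7, hfi, hk,
                  hlen, hi, kq1, kq2, kq3, kq4, pvSingleWord, PySem.Dict.get?_mk_cons,
                  beq_self_eq_true, if_true, if_false, Bool.false_eq_true, ne_eq,
                  not_false_eq_true, Bool.false_eq_true, if_true, if_false]
              · have s5 : PySem.Str.startswith lt ("edo" ++ " ") = false :=
                  Bool.eq_false_iff.mpr fun hh => c5 ((hiff _ (by decide)).mp hh)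
                have k5 := keyNe "edo" c5
                by_cases c6 : lt.toList.take n = "ode".toList
                · have s6 : PySem.Str.startswith lt ("ode" ++ " ") = true := (hiff _ (by decide)).mpr c6
                  have hk := keyEq _ c6
                  have hlen : PySem.Str.len ("ode" ++ " ") = 4 := by decide
                  have hi : PySem.Str.find lt " " + 1 = (4 : Int) := by
                    rw [hidx _ c6]; decide
                  have kq1 : ("derivar" == ("ode" : String)) = false := by decide
                  have kq2 : ("derivada" == ("ode" : String)) = false := by decide
                  have kq3 : ("integrar" == ("ode" : String)) = false := by decide
                  have kq4 : ("integral" == ("ode" : String)) = false := by decide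
                  have kq5 : ("edo" == ("ode" : String)) = false := by decide
                  simp only [pvLoopA, pvCommandsA, pvBBody, s1, s2, s3, s4, s5, s6, hecB, b7,
                    hfi, hk, hlen, hi, kq1, kq2, kq3, kq4, kq5, pvSingleWord,
                    PySem.Dict.get?_mk_cons, beq_self_eq_true, if_true, if_false,
                    Bool.false_eq_true, ne_eq, not_false_eq_true, Bool.false_eq_true, if_true, if_false]
                · have s6 : PySem.Str.startswith lt ("ode" ++ " ") = false :=
                    Bool.eq_false_iff.mpr fun hh => c6 ((hiff _ (by decide)).mp hh)
                  have k6 := keyNe "ode" c6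
                  simp only [pvLoopA, pvCommandsA, pvBBody, s1, s2, s3, s4, s5, s6, hecB, b7,
                    hfi, k1, k2, k3, k4, k5, k6, pvSingleWord, PySem.Dict.get?_mk_cons,
                    pvGetNil, Bool.false_eq_true, if_false, ne_eq, if_true]

-- ===== VERDICT (by name: the statement is the Claim_ definition above) =====
theorem extract_inline_calculus_command_py_spec : Claim_equal_extract_inline_calculus_command_py := by
  intro operation expression _
  show extract_inline_calculus_command_py operation expression =
    extract_inline_calculus_command_py_alt operation expression
  rw [pvAlt_eq]
  exact pvMain operation (PySem.Str.strip expression) (PySem.Str.lower (PySem.Str.strip expression))
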